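-- pv_equiv track=rewrite | github.com/TobiasDanielAngelo/dats-app | server/product/serializers.py | int_to_code
-- ===== SOURCE A (Python) =====
-- def int_to_code(n: float) -> str:
--     num = int(n)  # truncate decimals
--     mapping = {
--         1: "L",
--         2: "U",
--         3: "C",
--         4: "K",
--         5: "Y",
--         6: "S",
--         7: "T",
--         8: "O",
--         9: "R",
--         0: "E",
--     }
--     return "".join(mapping[int(d)] for d in str(abs(num)))
-- ===== SOURCE B (Python) =====
-- def int_to_code(n: float) -> str:
--     num = abs(int(n))
--     mapping = {
--         1: "L",
--         2: "U",
--         3: "C",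
--         4: "K",
--         5: "Y",
--         6: "S",
--         7: "T",
--         8: "O",
--         9: "R",
--         0: "E",
--     }
--     if num == 0:
--         return mapping[0]
--     out = ""
--     while num:
--         out = mapping[num % 10] + out
--         num //= 10
--     return out
-- ===== Notes on version B (the rewrite author's own statement) =====
-- stated objective: alternative
-- what changed: Digits are extracted arithmetically (num % 10 / num //= 10 in a while loop, building the string back-to-front) instead of iterating over the characters of str(abs(num)) and re-parsing each with int().
import Mathlib
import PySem

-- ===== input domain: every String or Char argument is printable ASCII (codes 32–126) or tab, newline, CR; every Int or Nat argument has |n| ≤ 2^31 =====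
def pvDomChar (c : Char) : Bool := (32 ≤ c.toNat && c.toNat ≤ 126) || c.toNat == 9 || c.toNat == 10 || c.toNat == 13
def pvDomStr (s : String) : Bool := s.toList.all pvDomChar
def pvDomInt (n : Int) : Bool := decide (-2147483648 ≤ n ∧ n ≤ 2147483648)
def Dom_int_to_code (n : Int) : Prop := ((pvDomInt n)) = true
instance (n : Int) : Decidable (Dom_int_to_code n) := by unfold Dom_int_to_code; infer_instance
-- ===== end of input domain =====

-- B replaces A's per-character iteration over str(abs(num)) by an arithmetic
-- while loop (num % 10 / num //= 10) building the string back-to-front; same values.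

-- ===== PORT A =====
-- the digit→letter dict, shared by both Pythons
def pvMapping : PySem.Dict Int String :=
  PySem.Dict.ofList [(1, "L"), (2, "U"), (3, "C"), (4, "K"), (5, "Y"),
   (6, "S"), (7, "T"), (8, "O"), (9, "R"), (0, "E")]

-- int(d) on a single decimal-digit character and mapping[·] on a key in 0..9 never
-- raise, so the .getD defaults (0 / "") are unreachable and the port is exact.
def int_to_code (n : Int) : String :=
  -- num = int(n): n is already an integer, so num is n itself
  PySem.Str.join "" ((PySem.Int.toStr |n|).toList.map
    (fun d => pvMapping.getD ((PySem.Int.ofChars? [d]).getD 0) ""))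

-- ===== PORT B =====
-- the while loop of Source B: out = mapping[num % 10] + out; num //= 10.
-- Python string concatenation is ported over List Char (exact); num = abs(int(n)) ≥ 0 is a Nat.
def pvGo (num : Nat) (out : List Char) : List Char :=
  if num = 0 then out
  else pvGo (num / 10) ((pvMapping.getD ((num % 10 : Nat) : Int) "").toList ++ out)
decreasing_by exact Nat.div_lt_self (Nat.pos_of_ne_zero (by assumption)) (by norm_num)

def int_to_code_alt (n : Int) : String :=
  -- num = abs(int(n)) = n.natAbs, a Nat
  if n.natAbs = 0 then pvMapping.getD 0 ""
  else String.ofList (pvGo n.natAbs [])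

-- ===== PRECONDITION & SPEC =====
def Spec_int_to_code (n : Int) (out : String) : Prop := out = int_to_code_alt n
instance (n : Int) (out : String) : Decidable (Spec_int_to_code n out) := by unfold Spec_int_to_code; infer_instance

-- ===== CLAIM (what is proved, stated in full; the proofs are below) =====
def Claim_equal_int_to_code : Prop := ∀ (n : Int), Dom_int_to_code n → Spec_int_to_code n (int_to_code n)

-- ===== LEMMAS AND PROOFS =====

-- the decimal digit characters of m, most significant first (proof-side characterisation)
def pvDRev (m : Nat) : List Char :=
  if m < 10 then [(m % 10).digitChar]
  else pvDRev (m / 10) ++ [(m % 10).digitChar]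
decreasing_by exact Nat.div_lt_self (by omega) (by norm_num)

-- A's per-character letter function
def pvLetter (d : Char) : String :=
  pvMapping.getD ((PySem.Int.ofChars? [d]).getD 0) ""

theorem pv_tdc_succ (f n : Nat) (ds : List Char) :
    Nat.toDigitsCore 10 (f + 1) n ds =
      if n / 10 = 0 then (n % 10).digitChar :: ds
      else Nat.toDigitsCore 10 f (n / 10) ((n % 10).digitChar :: ds) := rfl

theorem pv_tdc_eq : ∀ (f n : Nat) (ds : List Char), n < f →
    Nat.toDigitsCore 10 f n ds = pvDRev n ++ ds := by
  intro f
  induction f with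
  | zero => intro n ds h; omega
  | succ f ih =>
    intro n ds h
    rw [pv_tdc_succ]
    by_cases h10 : n / 10 = 0
    · have : n < 10 := by omega
      simp [h10, pvDRev, this]
    · have hn10 : ¬ n < 10 := by omega
      rw [if_neg h10, ih (n / 10) _ (by omega)]
      conv_rhs => rw [pvDRev]
      simp [hn10]

theorem pv_toDigits_eq (m : Nat) : Nat.toDigits 10 m = pvDRev m := by
  simpa using pv_tdc_eq (m + 1) m [] (by omega)

-- joining with empty separator is flattening
theorem pv_join_nil_flatten (l : List (List Char)) :
    PySem.Chars.join [] l = l.flatten := by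
  induction l with
  | nil => simp [PySem.Chars.join, List.intercalate]
  | cons x xs ih =>
    cases xs with
    | nil => simp [PySem.Chars.join, List.intercalate]
    | cons y ys =>
      simp [PySem.Chars.join, List.intercalate, List.intersperse] at ih ⊢
      simpa using ih

-- per-digit agreement between A's char lookup and B's arithmetic lookup
theorem pv_letter_digit (k : Nat) (h : k < 10) :
    (pvLetter (Nat.digitChar k)).toList
      = (pvMapping.getD ((k : Nat) : Int) "").toList := by
  interval_cases k <;> rfl

-- the flattened letters of a char list, list-level
def pvF (cs : List Char) : List Char := (cs.map (fun c => (pvLetter c).toList)).flatten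

theorem pvF_append (xs ys : List Char) : pvF (xs ++ ys) = pvF xs ++ pvF ys := by
  simp [pvF]

theorem pv_go_eq : ∀ (m : Nat), m ≠ 0 → ∀ (acc : List Char),
    pvGo m acc = pvF (pvDRev m) ++ acc := by
  intro m
  induction m using Nat.strong_induction_on with
  | _ m ih =>
    intro hm acc
    rw [pvGo, if_neg hm]
    by_cases h10 : m < 10
    · have h0 : m / 10 = 0 := by omega
      rw [pvGo, if_pos h0]
      rw [pvDRev, if_pos h10]
      simp [pvF, pv_letter_digit (m % 10) (by omega)]
    · rw [ih (m / 10) (Nat.div_lt_self (by omega) (by norm_num)) (by omega)]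
      conv_rhs => rw [pvDRev, if_neg h10]
      rw [pvF_append]
      simp [pvF, pv_letter_digit (m % 10) (by omega)]

theorem pv_A_chars (n : Int) :
    int_to_code n = String.ofList (pvF (pvDRev n.natAbs)) := by
  unfold int_to_code
  have habs : |n| = ((n.natAbs : Nat) : Int) := Int.abs_eq_natAbs n
  rw [habs]
  have : (PySem.Int.toStr ((n.natAbs : Nat) : Int)).toList
      = Nat.toDigits 10 n.natAbs := by
    rw [PySem.Int.toList_toStr]
    unfold PySem.Int.toChars
    rw [if_neg (Int.not_lt.mpr (Int.natCast_nonneg _)), Int.toNat_natCast]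
  rw [PySem.Str.join, this, pv_toDigits_eq]
  congr 1
  rw [show ("" : String).toList = [] from rfl, pv_join_nil_flatten]
  simp [pvF, pvLetter, Function.comp_def]

-- ===== VERDICT (by name: the statement is the Claim_ definition above) =====
theorem int_to_code_spec : Claim_equal_int_to_code := by
  intro n _
  unfold Spec_int_to_code
  rw [pv_A_chars]
  unfold int_to_code_alt
  by_cases h0 : n.natAbs = 0
  · rw [h0, if_pos rfl]
    have h : pvF (pvDRev 0) = ['E'] := by rw [pvDRev]; rfl
    have h2 : pvMapping.getD 0 "" = "E" := rfl
    rw [h, h2]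
  · rw [if_neg h0, pv_go_eq n.natAbs h0 []]
    simp
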